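-- pv_equiv track=rewrite | github.com/HIQC-SEU/ZernFDA | Ours/Ours.py | get_s_from_order
-- ===== SOURCE A (Python) =====
-- def get_s_from_order(
-- 	polynomial_order
-- ):
-- 	# 定义s
-- 	s = 0
--
-- 	# 遍历
-- 	for n in range(0,polynomial_order + 1):
-- 		for m in range(-n,n + 1):
-- 			# 如果n-m为奇数,跳过
-- 			if (n-m) % 2 == 1:
-- 				continue
--
-- 			# 计数
-- 			s = s + 1
--
-- 	# 返回
-- 	return s
-- ===== SOURCE B (Python) =====
-- def get_s_from_order(polynomial_order):
--     # Closed form: for each n in 0..N there are n+1 admissible m, so the total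
--     # is the triangular number (N+1)(N+2)/2; an empty range gives 0.
--     if polynomial_order < 0:
--         return 0
--     return (polynomial_order + 1) * (polynomial_order + 2) // 2
-- ===== Notes on version B (the rewrite author's own statement) =====
-- stated objective: faster
-- what changed: Replaces the double loop over Zernike index pairs with the closed-form triangular number (N+1)(N+2)//2 (0 for negative N).
import Mathlib
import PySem

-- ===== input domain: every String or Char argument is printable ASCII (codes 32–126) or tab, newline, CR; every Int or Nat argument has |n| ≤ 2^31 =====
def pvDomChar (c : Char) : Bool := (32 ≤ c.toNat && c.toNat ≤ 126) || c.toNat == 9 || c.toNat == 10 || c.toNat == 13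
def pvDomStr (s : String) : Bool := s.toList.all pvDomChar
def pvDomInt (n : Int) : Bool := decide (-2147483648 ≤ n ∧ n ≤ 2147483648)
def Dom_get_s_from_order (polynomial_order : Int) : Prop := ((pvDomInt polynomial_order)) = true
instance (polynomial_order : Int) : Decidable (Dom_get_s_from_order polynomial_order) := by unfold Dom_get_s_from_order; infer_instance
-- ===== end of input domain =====

-- ===== PORT A =====
-- Literal port of A: double loop over n in range(0, N+1) and m in range(-n, n+1),
-- skipping pairs with (n-m) % 2 == 1.
def get_s_from_order (polynomial_order : Int) : Int :=
  (PySem.List.pyRange 0 (polynomial_order + 1) 1).foldl (fun s n =>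
    (PySem.List.pyRange (-n) (n + 1) 1).foldl
      (fun s m => if PySem.Int.mod (n - m) 2 == 1 then s else s + 1) s) 0

-- ===== PORT B =====
-- B: closed-form triangular number; 0 when the outer range is empty.
def get_s_from_order_alt (polynomial_order : Int) : Int :=
  if polynomial_order < 0 then 0
  else PySem.Int.floordiv ((polynomial_order + 1) * (polynomial_order + 2)) 2

-- ===== PRECONDITION & SPEC =====
def Spec_get_s_from_order (polynomial_order : Int) (out : Int) : Prop := out = get_s_from_order_alt polynomial_order
instance (polynomial_order : Int) (out : Int) : Decidable (Spec_get_s_from_order polynomial_order out) := by unfold Spec_get_s_from_order; infer_instance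

-- ===== CLAIM (what is proved, stated in full; the proofs are below) =====
def Claim_equal_get_s_from_order : Prop := ∀ (polynomial_order : Int), Dom_get_s_from_order polynomial_order → Spec_get_s_from_order polynomial_order (get_s_from_order polynomial_order)

-- ===== LEMMAS AND PROOFS =====

-- The inner fold's step counts m with (n - m) even.
theorem inner_count (k : Nat) (n : Int) :
    ((PySem.List.pyRange (n - 2*(k:Int)) (n + 1) 1).countP
      (fun m => !(PySem.Int.mod (n - m) 2 == 1))) = k + 1 := by
  induction k with
  | zero =>
      simp only [Nat.cast_zero, mul_zero, sub_zero]
      rw [PySem.List.pyRange_one_singleton]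
      simp [PySem.Int.mod]
  | succ k ih =>
      push_cast
      rw [PySem.List.pyRange_one_cons (by omega),
          PySem.List.pyRange_one_cons (by omega)]
      have h1 : n - 2*((k:Int)+1) + 1 + 1 = n - 2*(k:Int) := by ring
      rw [h1]
      have e1 : PySem.Int.mod (n - (n - 2*((k:Int)+1))) 2 = 0 := by
        have : n - (n - 2*((k:Int)+1)) = 2*((k:Int)+1) := by ring
        rw [this, PySem.Int.mod_eq_zero_iff_dvd]
        exact ⟨(k:Int)+1, rfl⟩
      have e2 : PySem.Int.mod (n - (n - 2*((k:Int)+1) + 1)) 2 = 1 := by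
        have h2 : n - (n - 2*((k:Int)+1) + 1) = 2*(k:Int) + 1 := by ring
        rw [h2]
        have := PySem.Int.floordiv_mul_add_mod (2*(k:Int)+1) 2
        have hlt := PySem.Int.mod_lt (2*(k:Int)+1) (b := 2) (by omega)
        have hge := PySem.Int.mod_nonneg (2*(k:Int)+1) (b := 2) (by omega)
        omega
      simp only [List.countP_cons, e1, e2]
      norm_num at ih ⊢
      omega

-- The inner loop adds n + 1 to the accumulator (for n ≥ 0).
theorem inner_fold (n s : Int) (hn : 0 ≤ n) :
    (PySem.List.pyRange (-n) (n + 1) 1).foldl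
      (fun s m => if PySem.Int.mod (n - m) 2 == 1 then s else s + 1) s = s + (n + 1) := by
  have hstep : ∀ (acc m : Int),
      (if PySem.Int.mod (n - m) 2 == 1 then acc else acc + 1)
        = (if (!(PySem.Int.mod (n - m) 2 == 1)) = true then acc + 1 else acc) := by
    intro acc m
    cases hb : (PySem.Int.mod (n - m) 2 == 1)
    · simp [hb]
    · simp [hb, PySem.Int.mod_two_eq]
  calc (PySem.List.pyRange (-n) (n + 1) 1).foldl
        (fun s m => if PySem.Int.mod (n - m) 2 == 1 then s else s + 1) s
      = (PySem.List.pyRange (-n) (n + 1) 1).foldl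
        (fun s m => if (!(PySem.Int.mod (n - m) 2 == 1)) = true then s + 1 else s) s := by
        exact PySem.List.foldl_congr_mem _ _ _ _ (fun acc m _ => hstep acc m)
    _ = s + (((PySem.List.pyRange (-n) (n + 1) 1).countP
          (fun m => !(PySem.Int.mod (n - m) 2 == 1))) : Int) := by
        exact PySem.List.foldl_if_add_one _ _ _
    _ = s + (n + 1) := by
        have h1 : -n = n - 2*((n.toNat : Int)) := by omega
        rw [h1, inner_count n.toNat n]
        push_cast
        omega

-- The outer loop sums n+1 over n = 0..N.
theorem outer_fold (k : Nat) :
    (PySem.List.pyRange 0 ((k:Int) + 1) 1).foldl (fun s n =>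
      (PySem.List.pyRange (-n) (n + 1) 1).foldl
        (fun s m => if PySem.Int.mod (n - m) 2 == 1 then s else s + 1) s) 0
      * 2 = ((k:Int) + 1) * ((k:Int) + 2) := by
  induction k with
  | zero =>
      simp only [Nat.cast_zero, zero_add]
      rw [PySem.List.pyRange_one_cons (by omega), PySem.List.pyRange_one_eq_nil (by omega)]
      simp only [List.foldl_cons, List.foldl_nil]
      rw [inner_fold 0 0 le_rfl]; ring
  | succ k ih =>
      push_cast
      rw [PySem.List.pyRange_one_succ_right (by omega), List.foldl_append]
      simp only [List.foldl_cons, List.foldl_nil]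
      rw [inner_fold ((k:Int)+1) _ (by omega)]
      push_cast at ih ⊢
      nlinarith [ih]

-- ===== VERDICT (by name: the statement is the Claim_ definition above) =====
theorem get_s_from_order_spec : Claim_equal_get_s_from_order := by
  intro p _
  unfold Spec_get_s_from_order get_s_from_order get_s_from_order_alt
  by_cases hp : p < 0
  · rw [PySem.List.pyRange_one_eq_nil (by omega)]
    simp [hp]
  · simp only [hp, if_false]
    obtain ⟨k, hk⟩ : ∃ k : Nat, p = (k : Int) := ⟨p.toNat, by omega⟩
    subst hk
    have h := outer_fold k
    rw [eq_comm, PySem.Int.floordiv_eq_iff_of_pos (by omega)]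
    constructor <;> nlinarith [h]
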